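-- pv_equiv track=rewrite | github.com/apeshape/aoc-2020 | 06/__main__.py | checkAnswersMatch
-- ===== SOURCE A (Python) =====
-- def checkAnswersMatch(testAgainst, answers):
--   if len(answers) == 0:
--     return testAgainst
--
--   newTestAgainst = []
--   for otherAnswer in list(answers[0]):
--     if otherAnswer in list(testAgainst) and otherAnswer not in newTestAgainst:
--       newTestAgainst.append(otherAnswer)
--
--   return checkAnswersMatch(newTestAgainst, answers[1:])
-- ===== SOURCE B (Python) =====
-- def checkAnswersMatch(testAgainst, answers):
--   result = list(testAgainst)
--   for answer in answers:
--     seen = set(result)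
--     result = list(dict.fromkeys(c for c in answer if c in seen))
--   return result
-- ===== Notes on version B (the rewrite author's own statement) =====
-- stated objective: faster
-- what changed: Replaces the recursion with a single iterative fold over the groups that, per group, filters through a hash set and deduplicates with dict.fromkeys, removing the linear in-list membership scans of the inner loop.
-- outside the precondition, e.g. on checkAnswersMatch('ab', []): A returns 'ab', B returns ['a', 'b']
import Mathlib
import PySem

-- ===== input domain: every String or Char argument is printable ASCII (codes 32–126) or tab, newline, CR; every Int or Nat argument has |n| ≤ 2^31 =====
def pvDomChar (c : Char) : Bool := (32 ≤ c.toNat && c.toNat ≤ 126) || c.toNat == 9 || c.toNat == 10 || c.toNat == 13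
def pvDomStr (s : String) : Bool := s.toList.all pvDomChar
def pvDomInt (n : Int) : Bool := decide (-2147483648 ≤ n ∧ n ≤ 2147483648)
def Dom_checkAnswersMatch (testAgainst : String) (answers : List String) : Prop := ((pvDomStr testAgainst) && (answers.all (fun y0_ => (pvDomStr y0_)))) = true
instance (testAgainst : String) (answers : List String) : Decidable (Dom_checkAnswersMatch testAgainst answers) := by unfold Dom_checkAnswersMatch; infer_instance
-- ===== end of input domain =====

-- B replaces A's recursion by one iterative fold (set membership + ordered dedup per group); return-value equivalence on nonempty answer lists.

-- list(s) for a Python string: its characters as single-character strings (Python chars ARE strings)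
def pvChars (s : String) : List String := s.toList.map (fun c => String.mk [c])

-- ===== PORT A =====
-- recursive worker: after the first step Python's testAgainst is a list of char-strings
def checkAnswersMatchGo (testAgainst : List String) : List String → List String
  | [] => testAgainst
  | a :: rest =>
      checkAnswersMatchGo
        ((pvChars a).foldl
          (fun newTestAgainst otherAnswer =>
            if otherAnswer ∈ testAgainst ∧ otherAnswer ∉ newTestAgainst
            then newTestAgainst ++ [otherAnswer] else newTestAgainst) [])
        rest

def checkAnswersMatch (testAgainst : String) (answers : List String) : List String :=
  match answers with
  | [] => [testAgainst]  -- Python returns the STRING testAgainst here (not a list of strings); outside Pre_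
  | _ => checkAnswersMatchGo (pvChars testAgainst) answers

-- ===== PORT B =====
def checkAnswersMatch_alt (testAgainst : String) (answers : List String) : List String :=
  answers.foldl
    (fun result answer =>
      let seen : PySem.Set String := PySem.Set.ofList result
      PySem.List.dedup ((pvChars answer).filter (fun c => PySem.Set.contains seen c)))
    (pvChars testAgainst)

-- ===== PRECONDITION & SPEC =====
-- Pre_ excludes answers = [], where Python A returns the string testAgainst itself — a str, not a value of the declared list-of-strings type.
def Pre_checkAnswersMatch (testAgainst : String) (answers : List String) : Prop := answers ≠ []
instance (testAgainst : String) (answers : List String) : Decidable (Pre_checkAnswersMatch testAgainst answers) := by unfold Pre_checkAnswersMatch; infer_instance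
def pvWitness_checkAnswersMatch : String × List String := ("abc", ["cab", "bc"])

def Spec_checkAnswersMatch (testAgainst : String) (answers : List String) (out : List String) : Prop := out = checkAnswersMatch_alt testAgainst answers
instance (testAgainst : String) (answers : List String) (out : List String) : Decidable (Spec_checkAnswersMatch testAgainst answers out) := by unfold Spec_checkAnswersMatch; infer_instance

-- ===== CLAIM (what is proved, stated in full; the proofs are below) =====
def Claim_equal_checkAnswersMatch : Prop := ∀ (testAgainst : String) (answers : List String), Dom_checkAnswersMatch testAgainst answers → Pre_checkAnswersMatch testAgainst answers → Spec_checkAnswersMatch testAgainst answers (checkAnswersMatch testAgainst answers)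

-- ===== LEMMAS AND PROOFS =====

-- A's inner append-if-absent loop over one group equals B's filter-through-a-set then ordered dedup.
lemma pvLoopA_aux (t : List String) (chars : List String) (acc : List String) :
    chars.foldl
      (fun newTestAgainst otherAnswer =>
        if otherAnswer ∈ t ∧ otherAnswer ∉ newTestAgainst
        then newTestAgainst ++ [otherAnswer] else newTestAgainst) acc =
    (chars.filter (fun c => PySem.Set.contains (PySem.Set.ofList t) c)).foldl PySem.Set.add acc := by
  induction chars generalizing acc with
  | nil => rfl
  | cons c cs ih =>
    by_cases hc : c ∈ t
    · simp only [List.foldl_cons, List.filter_cons]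
      have hcon : PySem.Set.contains (PySem.Set.ofList t) c = true := by
        simp [pysem, hc]
      rw [hcon]
      simp only [if_true, List.foldl_cons]
      have : (if c ∈ t ∧ c ∉ acc then acc ++ [c] else acc) = PySem.Set.add acc c := by
        by_cases hm : c ∈ acc <;> simp [PySem.Set.add, PySem.Set.contains, hc, hm]
      rw [this, ih]
    · simp only [List.foldl_cons, List.filter_cons]
      have hcon : PySem.Set.contains (PySem.Set.ofList t) c = false := by
        simp [pysem, hc]
      rw [hcon]
      simp only [hc, false_and, if_false]
      exact ih acc

lemma pvStep_eq (t : List String) (a : List String) :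
    a.foldl
      (fun newTestAgainst otherAnswer =>
        if otherAnswer ∈ t ∧ otherAnswer ∉ newTestAgainst
        then newTestAgainst ++ [otherAnswer] else newTestAgainst) [] =
    PySem.List.dedup (a.filter (fun c => PySem.Set.contains (PySem.Set.ofList t) c)) := by
  rw [pvLoopA_aux, PySem.List.dedup_eq_ofList, PySem.Set.ofList_eq_foldl, PySem.Set.ofList_eq_foldl]

lemma pvGo_eq (answers : List String) (t : List String) :
    checkAnswersMatchGo t answers =
    answers.foldl
      (fun result answer =>
        PySem.List.dedup ((pvChars answer).filter
          (fun c => PySem.Set.contains (PySem.Set.ofList result) c))) t := by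
  induction answers generalizing t with
  | nil => rfl
  | cons a rest ih =>
    simp only [checkAnswersMatchGo, List.foldl_cons]
    rw [pvStep_eq, ih]

-- ===== VERDICT (by name: the statement is the Claim_ definition above) =====
theorem checkAnswersMatch_spec : Claim_equal_checkAnswersMatch := by
  intro testAgainst answers _ hpre
  unfold Spec_checkAnswersMatch checkAnswersMatch checkAnswersMatch_alt
  cases answers with
  | nil => exact absurd rfl hpre
  | cons a rest => exact pvGo_eq (a :: rest) (pvChars testAgainst)
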